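-- pv_equiv track=rewrite | github.com/adamtry/advent-of-code-2022 | Day08: Treetop Tree House/index.py | get_visible_tree_indexes_for_line
-- ===== SOURCE A (Python) =====
-- def get_visible_tree_indexes_for_line(tree_line: list[int]) -> set[int]:
--     visible_tree_indexes = set()
--
--     range_left_right = range(0, len(tree_line))
--     range_right_left = range(len(tree_line) - 1, 0, -1)
--
--     for my_range in [range_left_right, range_right_left]:
--         current_height = -1
--         for index in my_range:
--             tree_height = tree_line[index]
--             if tree_height > current_height:
--                 visible_tree_indexes.add(index)
--                 current_height = tree_height
--
--     return visible_tree_indexes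
-- ===== SOURCE B (Python) =====
-- def get_visible_tree_indexes_for_line(tree_line: list[int]) -> set[int]:
--     n = len(tree_line)
--     visible_left = [i for i in range(n)
--                     if tree_line[i] > max([-1] + tree_line[:i])]
--     visible_right = [i for i in range(n - 1, 0, -1)
--                      if tree_line[i] > max([-1] + tree_line[i + 1:])]
--     return set(visible_left + visible_right)
-- ===== Notes on version B (the rewrite author's own statement) =====
-- stated objective: alternative
-- what changed: Replaces the two stateful running-max scans by two order-free filter comprehensions that test each index directly against the maximum of its prefix (resp. suffix) slice, then unions the two index lists into a set.
import Mathlib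
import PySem

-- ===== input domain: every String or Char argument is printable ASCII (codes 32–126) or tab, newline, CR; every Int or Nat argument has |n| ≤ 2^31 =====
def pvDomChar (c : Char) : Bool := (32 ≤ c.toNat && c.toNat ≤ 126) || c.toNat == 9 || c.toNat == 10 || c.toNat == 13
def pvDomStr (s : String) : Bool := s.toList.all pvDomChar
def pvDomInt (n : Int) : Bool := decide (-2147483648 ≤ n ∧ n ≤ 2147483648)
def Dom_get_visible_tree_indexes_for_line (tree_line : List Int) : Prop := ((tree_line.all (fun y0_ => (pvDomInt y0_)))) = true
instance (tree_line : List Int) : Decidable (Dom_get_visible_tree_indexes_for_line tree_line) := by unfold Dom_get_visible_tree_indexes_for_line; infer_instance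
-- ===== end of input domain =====

-- B recasts the two running-max scans as slice-maximum filter comprehensions (alternative decomposition; not faster).


-- ===== PORT A =====
-- inner loop body of A: 'if tree_height > current_height: add index; current_height = tree_height'
def pvStepA (tree_line : List Int) (st : PySem.Set Int × Int) (index : Int) : PySem.Set Int × Int :=
  let tree_height := PySem.List.pyGetD tree_line index 0   -- tree_line[index]; every index produced by the ranges is in range
  if tree_height > st.2 then (PySem.Set.add st.1 index, tree_height) else st

def get_visible_tree_indexes_for_line (tree_line : List Int) : List Int :=
  let n : Int := tree_line.length
  let range_left_right := PySem.List.pyRange 0 n 1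
  let range_right_left := PySem.List.pyRange (n - 1) 0 (-1)
  [range_left_right, range_right_left].foldl
    (fun visible_tree_indexes my_range =>
      (my_range.foldl (pvStepA tree_line) (visible_tree_indexes, -1)).1)
    PySem.Set.empty

-- ===== PORT B =====
-- max([-1] + l): Python max over the nonempty list [-1] + l, i.e. a left fold of max started at -1
def pvMaxNegOne (l : List Int) : Int := l.foldl max (-1)

def get_visible_tree_indexes_for_line_alt (tree_line : List Int) : List Int :=
  let n : Int := tree_line.length
  let visible_left := (PySem.List.pyRange 0 n 1).filter
    (fun i => decide (PySem.List.pyGetD tree_line i 0 >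
      pvMaxNegOne (PySem.List.slice tree_line none (some i))))
  let visible_right := (PySem.List.pyRange (n - 1) 0 (-1)).filter
    (fun i => decide (PySem.List.pyGetD tree_line i 0 >
      pvMaxNegOne (PySem.List.slice tree_line (some (i + 1)) none)))
  PySem.Set.ofList (visible_left ++ visible_right)

-- ===== PRECONDITION & SPEC =====
def Spec_get_visible_tree_indexes_for_line (tree_line : List Int) (out : List Int) : Prop := out = get_visible_tree_indexes_for_line_alt tree_line
instance (tree_line : List Int) (out : List Int) : Decidable (Spec_get_visible_tree_indexes_for_line tree_line out) := by unfold Spec_get_visible_tree_indexes_for_line; infer_instance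

-- ===== CLAIM (what is proved, stated in full; the proofs are below) =====
def Claim_equal_get_visible_tree_indexes_for_line : Prop := ∀ (tree_line : List Int), Dom_get_visible_tree_indexes_for_line tree_line → Spec_get_visible_tree_indexes_for_line tree_line (get_visible_tree_indexes_for_line tree_line)

-- ===== LEMMAS AND PROOFS =====

-- commuting a fold of max with its start value
theorem pv_foldl_max_comm (l : List Int) : ∀ (a b : Int), l.foldl max (max a b) = max a (l.foldl max b) := by
  induction l with
  | nil => intro a b; rfl
  | cons c l ih =>
      intro a b
      simp only [List.foldl_cons]
      rw [max_assoc, ih]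

-- running prefix maximum: max([-1] + tree_line[:j+1]) in terms of max([-1] + tree_line[:j])
theorem pv_maxPre_succ (t : List Int) (j : Nat) (hj : j < t.length) :
    pvMaxNegOne (t.take (j + 1)) = max (pvMaxNegOne (t.take j)) t[j] := by
  unfold pvMaxNegOne
  rw [List.take_add_one, List.getElem?_eq_getElem hj]
  simp only [Option.toList_some, List.foldl_append, List.foldl_cons, List.foldl_nil]

-- running suffix maximum: max([-1] + tree_line[j:]) in terms of max([-1] + tree_line[j+1:])
theorem pv_maxSuf_eq (t : List Int) (j : Nat) (hj : j < t.length) :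
    pvMaxNegOne (t.drop j) = max (pvMaxNegOne (t.drop (j + 1))) t[j] := by
  unfold pvMaxNegOne
  rw [List.drop_eq_getElem_cons hj]
  simp only [List.foldl_cons]
  rw [max_comm (-1) t[j], pv_foldl_max_comm]
  exact max_comm _ _

-- the left-to-right pass of A computes B's left filter, one Set.add per kept index
theorem pv_left_pass (t : List Int) : ∀ (k j : Nat) (s : PySem.Set Int), j + k = t.length →
    (PySem.List.pyRange (j : Int) (t.length : Int) 1).foldl (pvStepA t) (s, pvMaxNegOne (t.take j))
    = (((PySem.List.pyRange (j : Int) (t.length : Int) 1).filter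
          (fun i => decide (PySem.List.pyGetD t i 0 >
            pvMaxNegOne (PySem.List.slice t none (some i))))).foldl PySem.Set.add s,
        pvMaxNegOne t) := by
  intro k
  induction k with
  | zero =>
      intro j s hj
      rw [PySem.List.pyRange_one_eq_nil (by omega)]
      simp only [List.foldl_nil, List.filter_nil]
      rw [List.take_of_length_le (by omega)]
  | succ k ih =>
      intro j s hj
      have hjlt : j < t.length := by omega
      rw [PySem.List.pyRange_one_cons (by exact_mod_cast hjlt)]
      have hcast : ((j : Int) + 1) = ((j + 1 : Nat) : Int) := by push_cast; ring
      have hget : PySem.List.pyGetD t (j : Int) 0 = t[j] := by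
        rw [PySem.List.pyGetD_natCast]; exact List.getD_eq_getElem t 0 hjlt
      have hslice : PySem.List.slice t none (some (j : Int)) = t.take j :=
        PySem.List.slice_to_natCast t j
      simp only [List.foldl_cons, List.filter_cons]
      by_cases hc : t[j] > pvMaxNegOne (t.take j)
      · have hcond : (decide (PySem.List.pyGetD t (j : Int) 0 >
            pvMaxNegOne (PySem.List.slice t none (some (j : Int))))) = true := by
          rw [hget, hslice]; exact decide_eq_true hc
        rw [hcond]
        have hstep : pvStepA t (s, pvMaxNegOne (t.take j)) (j : Int)
            = (PySem.Set.add s (j : Int), pvMaxNegOne (t.take (j + 1))) := by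
          unfold pvStepA
          rw [hget]
          simp only [if_pos hc]
          rw [pv_maxPre_succ t j hjlt, max_eq_right (le_of_lt hc)]
        rw [hstep, hcast, ih (j + 1) (PySem.Set.add s (j : Int)) (by omega)]
        simp
      · have hcond : (decide (PySem.List.pyGetD t (j : Int) 0 >
            pvMaxNegOne (PySem.List.slice t none (some (j : Int))))) = false := by
          rw [hget, hslice]; exact decide_eq_false hc
        rw [hcond]
        have hstep : pvStepA t (s, pvMaxNegOne (t.take j)) (j : Int)
            = (s, pvMaxNegOne (t.take (j + 1))) := by
          unfold pvStepA
          rw [hget]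
          simp only [if_neg hc]
          rw [pv_maxPre_succ t j hjlt, max_eq_left (by omega)]
        rw [hstep, hcast, ih (j + 1) s (by omega)]
        simp

-- the right-to-left pass of A computes B's right filter
theorem pv_right_pass (t : List Int) : ∀ (j : Nat), j < t.length → ∀ (s : PySem.Set Int),
    (PySem.List.pyRange (j : Int) 0 (-1)).foldl (pvStepA t) (s, pvMaxNegOne (t.drop (j + 1)))
    = (((PySem.List.pyRange (j : Int) 0 (-1)).filter
          (fun i => decide (PySem.List.pyGetD t i 0 >
            pvMaxNegOne (PySem.List.slice t (some (i + 1)) none)))).foldl PySem.Set.add s,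
        pvMaxNegOne (t.drop 1)) := by
  intro j
  induction j with
  | zero =>
      intro _ s
      rw [PySem.List.pyRange_neg_one_eq_nil (by norm_num)]
      simp
  | succ j ih =>
      intro hlt s
      have hjlt : j + 1 < t.length := hlt
      have hdd : t.drop (j + 1 + 1) = t.drop (j + 2) := rfl
      rw [hdd]
      rw [PySem.List.pyRange_neg_one_cons (by exact_mod_cast Nat.succ_pos j)]
      have hcast : (((j + 1 : Nat) : Int) - 1) = ((j : Nat) : Int) := by push_cast; ring
      have hget : PySem.List.pyGetD t ((j + 1 : Nat) : Int) 0 = t[j + 1] := by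
        rw [PySem.List.pyGetD_natCast]; exact List.getD_eq_getElem t 0 hjlt
      have hslice : PySem.List.slice t (some (((j + 1 : Nat) : Int) + 1)) none = t.drop (j + 2) := by
        have h2 : (((j + 1 : Nat) : Int) + 1) = ((j + 2 : Nat) : Int) := by push_cast; ring
        rw [h2]; exact PySem.List.slice_from_natCast t (j + 2)
      simp only [List.foldl_cons, List.filter_cons]
      by_cases hc : t[j + 1] > pvMaxNegOne (t.drop (j + 2))
      · have hcond : (decide (PySem.List.pyGetD t ((j + 1 : Nat) : Int) 0 >
            pvMaxNegOne (PySem.List.slice t (some (((j + 1 : Nat) : Int) + 1)) none))) = true := by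
          rw [hget, hslice]; exact decide_eq_true hc
        rw [hcond]
        have hstep : pvStepA t (s, pvMaxNegOne (t.drop (j + 2))) ((j + 1 : Nat) : Int)
            = (PySem.Set.add s ((j + 1 : Nat) : Int), pvMaxNegOne (t.drop (j + 1))) := by
          unfold pvStepA
          rw [hget]
          simp only [if_pos hc]
          rw [pv_maxSuf_eq t (j + 1) hjlt, hdd, max_eq_right (le_of_lt hc)]
        rw [hstep, hcast, ih (by omega) (PySem.Set.add s ((j + 1 : Nat) : Int))]
        simp
      · have hcond : (decide (PySem.List.pyGetD t ((j + 1 : Nat) : Int) 0 >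
            pvMaxNegOne (PySem.List.slice t (some (((j + 1 : Nat) : Int) + 1)) none))) = false := by
          rw [hget, hslice]; exact decide_eq_false hc
        rw [hcond]
        have hstep : pvStepA t (s, pvMaxNegOne (t.drop (j + 2))) ((j + 1 : Nat) : Int)
            = (s, pvMaxNegOne (t.drop (j + 1))) := by
          unfold pvStepA
          rw [hget]
          simp only [if_neg hc]
          rw [pv_maxSuf_eq t (j + 1) hjlt, hdd, max_eq_left (by omega)]
        rw [hstep, hcast, ih (by omega) s]
        simp

-- ===== VERDICT (by name: the statement is the Claim_ definition above) =====
theorem get_visible_tree_indexes_for_line_spec : Claim_equal_get_visible_tree_indexes_for_line := by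
  intro t _
  unfold Spec_get_visible_tree_indexes_for_line
  unfold get_visible_tree_indexes_for_line get_visible_tree_indexes_for_line_alt
  simp only [List.foldl_cons, List.foldl_nil]
  cases t with
  | nil => rfl
  | cons x rest =>
      have hL := pv_left_pass (x :: rest) (x :: rest).length 0 PySem.Set.empty (by omega)
      simp only [Nat.cast_zero, List.take_zero] at hL
      have hmz : pvMaxNegOne ([] : List Int) = -1 := rfl
      rw [hmz] at hL
      rw [hL]
      have hR := pv_right_pass (x :: rest) ((x :: rest).length - 1) (by simp)
        (((PySem.List.pyRange 0 ((x :: rest).length : Int) 1).filter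
          (fun i => decide (PySem.List.pyGetD (x :: rest) i 0 >
            pvMaxNegOne (PySem.List.slice (x :: rest) none (some i))))).foldl PySem.Set.add
          PySem.Set.empty)
      have hlen : (x :: rest).length - 1 + 1 = (x :: rest).length := by simp
      rw [hlen, List.drop_length, hmz] at hR
      have hcast : (((x :: rest).length - 1 : Nat) : Int) = ((x :: rest).length : Int) - 1 := by
        have h1 : 1 ≤ (x :: rest).length := by simp
        omega
      rw [hcast] at hR
      rw [hR]
      rw [PySem.Set.ofList_eq_foldl, List.foldl_append]
      rfl
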